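-- pv_equiv track=rewrite | github.com/EdmundMartin/LeetcodeAllSolutions | leetcode_easy/2287_rearrange_characters_to_make_target_string.py | rearrangeCharacters
-- ===== SOURCE A (Python) =====
-- def rearrangeCharacters(s: str, target: str) -> int:
--     counter = {}
--     target_set = set(target)
--     for ch in s:
--         if ch in target_set and ch not in counter:
--             counter[ch] = 1
--         elif ch in target_set:
--             counter[ch] += 1
--     count = 0
--     while True:
--         for ch in target:
--             if ch not in counter:
--                 return count
--             if counter[ch] == 0:
--                 return count
--             else:
--                 counter[ch] -= 1
--         count += 1
--     return
-- ===== SOURCE B (Python) =====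
-- def rearrangeCharacters(s: str, target: str) -> int:
--     cs = {}
--     for ch in s:
--         cs[ch] = cs.get(ch, 0) + 1
--     ct = {}
--     for ch in target:
--         ct[ch] = ct.get(ch, 0) + 1
--     return min(cs.get(ch, 0) // need for ch, need in ct.items())
-- ===== Notes on version B (the rewrite author's own statement) =====
-- stated objective: idiomatic
-- what changed: B builds frequency maps of s and target once and returns min over target's distinct characters of count_s(c)//count_target(c), instead of A's repeated walk over target decrementing counters until one runs out.
import Mathlib
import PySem

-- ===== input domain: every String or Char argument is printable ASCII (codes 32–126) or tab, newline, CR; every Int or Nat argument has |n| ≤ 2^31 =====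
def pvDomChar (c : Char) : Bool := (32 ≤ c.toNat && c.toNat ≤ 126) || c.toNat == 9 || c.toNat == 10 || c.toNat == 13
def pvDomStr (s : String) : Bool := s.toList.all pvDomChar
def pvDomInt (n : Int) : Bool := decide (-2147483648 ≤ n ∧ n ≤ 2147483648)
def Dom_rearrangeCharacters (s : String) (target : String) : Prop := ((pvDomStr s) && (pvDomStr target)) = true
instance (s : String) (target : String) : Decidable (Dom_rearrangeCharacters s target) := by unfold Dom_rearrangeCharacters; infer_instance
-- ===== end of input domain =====

-- B replaces A's simulated copy-by-copy decrement loop with one arithmetic minimum of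
-- count_s(c) // count_target(c) over target's distinct characters (idiomatic frequency-map form).

-- ===== PORT A =====
-- the 'for ch in s' counter-building loop (guarded by membership in target_set)
def pvBuildCounter (s : List Char) (tset : PySem.Set Char) : PySem.Dict Char Int :=
  s.foldl (fun counter ch =>
    if PySem.Set.contains tset ch && !(counter.contains ch) then counter.insert ch 1
    else if PySem.Set.contains tset ch then counter.insert ch (counter.getD ch 0 + 1)
    else counter) PySem.Dict.empty

-- the inner 'for ch in target' loop; 'none' models the early 'return count'
def pvPass (counter : PySem.Dict Char Int) : List Char → Option (PySem.Dict Char Int)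
  | [] => some counter
  | ch :: rest =>
    match counter.get? ch with
    | none => none
    | some v => if v = 0 then none else pvPass (counter.insert ch (v - 1)) rest

-- the 'while True' loop; the fuel is only a totality guard (A's loop returns within
-- |s|+1 iterations whenever target ≠ "", which Pre_ guarantees — proved in loop_eq below)
def pvLoop (target : List Char) : Nat → PySem.Dict Char Int → Int → Int
  | 0, _, count => count
  | fuel + 1, counter, count =>
    match pvPass counter target with
    | none => count
    | some counter' => pvLoop target fuel counter' (count + 1)

def rearrangeCharacters (s : String) (target : String) : Int :=
  pvLoop target.toList (s.toList.length + 1)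
    (pvBuildCounter s.toList (PySem.Set.ofList target.toList)) 0

-- ===== PORT B =====
-- the cs[ch] = cs.get(ch, 0) + 1 loop, used for both strings
def pvFreq (l : List Char) : PySem.Dict Char Int :=
  l.foldl (fun d ch => d.insert ch (d.getD ch 0 + 1)) PySem.Dict.empty

def rearrangeCharacters_alt (s : String) (target : String) : Int :=
  let cs := pvFreq s.toList
  let ct := pvFreq target.toList
  -- min(cs.get(ch, 0) // need for ch, need in ct.items()); [] is Python's ValueError, excluded by Pre_
  match ct.items with
  | [] => 0
  | (c, n) :: rest =>
    rest.foldl (fun m p => min m (PySem.Int.floordiv (cs.getD p.1 0) p.2))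
      (PySem.Int.floordiv (cs.getD c 0) n)

-- ===== PRECONDITION & SPEC =====
-- Pre_ excludes exactly target = "": there A's 'while True' loop never returns (and B's min
-- over an empty sequence raises ValueError).
def Pre_rearrangeCharacters (s : String) (target : String) : Prop := target ≠ ""
instance (s : String) (target : String) : Decidable (Pre_rearrangeCharacters s target) := by
  unfold Pre_rearrangeCharacters; infer_instance
def pvWitness_rearrangeCharacters : String × String := ("aabbc", "ab")

def Spec_rearrangeCharacters (s : String) (target : String) (out : Int) : Prop := out = rearrangeCharacters_alt s target
instance (s : String) (target : String) (out : Int) : Decidable (Spec_rearrangeCharacters s target out) := by unfold Spec_rearrangeCharacters; infer_instance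

-- ===== CLAIM (what is proved, stated in full; the proofs are below) =====
def Claim_equal_rearrangeCharacters : Prop := ∀ (s : String) (target : String), Dom_rearrangeCharacters s target → Pre_rearrangeCharacters s target → Spec_rearrangeCharacters s target (rearrangeCharacters s target)

-- ===== LEMMAS AND PROOFS =====

-- the value a Python lookup sees: the stored value if the key is present, else 0
def pvVal (d : PySem.Dict Char Int) (c : Char) : Int := (d.get? c).getD 0

def pvNonneg (d : PySem.Dict Char Int) : Prop := ∀ c x, d.get? c = some x → 0 ≤ x

-- minimum of a nonempty list (the empty case is a dummy)
def pvMinList : List Int → Int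
  | [] => 0
  | x :: xs => xs.foldl min x

lemma pvVal_insert (d : PySem.Dict Char Int) (k : Char) (v : Int) (c : Char) :
    pvVal (d.insert k v) c = if c = k then v else pvVal d c := by
  simp [pvVal, PySem.Dict.get?_insert]; split <;> simp

lemma pvNonneg_insert {d : PySem.Dict Char Int} {k : Char} {v : Int}
    (hd : pvNonneg d) (hv : 0 ≤ v) : pvNonneg (d.insert k v) := by
  intro c x hx
  rw [PySem.Dict.get?_insert] at hx
  split at hx
  · cases hx; exact hv
  · exact hd c x hx

lemma pvVal_nonneg {d : PySem.Dict Char Int} (hd : pvNonneg d) (c : Char) : 0 ≤ pvVal d c := by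
  unfold pvVal
  cases h : d.get? c with
  | none => simp
  | some x => simpa using hd c x h

lemma build_val (tset : PySem.Set Char) (l : List Char) (d : PySem.Dict Char Int) (c : Char) :
    pvVal (l.foldl (fun counter ch =>
      if PySem.Set.contains tset ch && !(counter.contains ch) then counter.insert ch 1
      else if PySem.Set.contains tset ch then counter.insert ch (counter.getD ch 0 + 1)
      else counter) d) c
    = pvVal d c + (if PySem.Set.contains tset c then (l.count c : Int) else 0) := by
  induction l generalizing d with
  | nil => simp
  | cons ch rest ih =>
    rw [List.foldl_cons]
    by_cases hts : PySem.Set.contains tset ch = true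
    · by_cases hmem : d.contains ch = true
      · rw [if_neg (by rw [hts, hmem]; simp), if_pos hts, ih, pvVal_insert]
        have hgd : d.getD ch 0 = pvVal d ch := by
          simp [pvVal, PySem.Dict.getD_eq_get?_getD]
        by_cases hc : c = ch
        · subst hc
          rw [if_pos rfl, if_pos hts, if_pos hts, hgd, List.count_cons_self]
          push_cast; ring
        · rw [if_neg hc, List.count_cons_of_ne (Ne.symm hc)]
      · rw [if_pos (by rw [hts]; simp [hmem]), ih, pvVal_insert]
        have h0 : pvVal d ch = 0 := by
          unfold pvVal
          rw [(PySem.Dict.get?_eq_none_iff_contains d ch).mpr (by simpa using hmem)]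
          rfl
        by_cases hc : c = ch
        · subst hc
          rw [if_pos rfl, if_pos hts, if_pos hts, h0, List.count_cons_self]
          push_cast; ring
        · rw [if_neg hc, List.count_cons_of_ne (Ne.symm hc)]
    · rw [if_neg (by rw [Bool.eq_false_iff.mpr hts]; simp), if_neg hts, ih]
      by_cases hc : c = ch
      · subst hc
        rw [if_neg hts, if_neg hts]
      · rw [List.count_cons_of_ne (Ne.symm hc)]

lemma build_nonneg (tset : PySem.Set Char) (l : List Char) (d : PySem.Dict Char Int)
    (hd : pvNonneg d) :
    pvNonneg (l.foldl (fun counter ch =>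
      if PySem.Set.contains tset ch && !(counter.contains ch) then counter.insert ch 1
      else if PySem.Set.contains tset ch then counter.insert ch (counter.getD ch 0 + 1)
      else counter) d) := by
  induction l generalizing d with
  | nil => exact hd
  | cons ch rest ih =>
    rw [List.foldl_cons]
    apply ih
    split
    · exact pvNonneg_insert hd (by norm_num)
    · split
      · refine pvNonneg_insert hd ?_
        have := pvVal_nonneg hd ch
        have hgd : d.getD ch 0 = pvVal d ch := by
          simp [pvVal, PySem.Dict.getD_eq_get?_getD]
        omega
      · exact hd

lemma pass_succ (l : List Char) (d : PySem.Dict Char Int) (hd : pvNonneg d)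
    (h : ∀ c ∈ l, (l.count c : Int) ≤ pvVal d c) :
    ∃ d', pvPass d l = some d' ∧ pvNonneg d' ∧ ∀ c, pvVal d' c = pvVal d c - l.count c := by
  induction l generalizing d with
  | nil => exact ⟨d, rfl, hd, by simp⟩
  | cons ch rest ih =>
    have hch : (1 : Int) ≤ pvVal d ch := by
      have := h ch List.mem_cons_self
      rw [List.count_cons_self] at this
      push_cast at this
      omega
    have hget : d.get? ch = some (pvVal d ch) := by
      cases hg : d.get? ch with
      | none => exfalso; unfold pvVal at hch; rw [hg] at hch; norm_num at hch
      | some x => unfold pvVal; rw [hg]; rfl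
    have hne : pvVal d ch ≠ 0 := by omega
    have hrest : ∀ c ∈ rest, (rest.count c : Int) ≤ pvVal (d.insert ch (pvVal d ch - 1)) c := by
      intro c hc
      rw [pvVal_insert]
      by_cases hceq : c = ch
      · subst hceq
        have := h c List.mem_cons_self
        rw [List.count_cons_self] at this
        push_cast at this
        rw [if_pos rfl]
        omega
      · rw [if_neg hceq]
        have := h c (List.mem_cons_of_mem _ hc)
        rw [List.count_cons_of_ne (Ne.symm hceq)] at this
        exact this
    obtain ⟨d', hd', hnn, hv⟩ := ih (d.insert ch (pvVal d ch - 1))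
      (pvNonneg_insert hd (by omega)) hrest
    refine ⟨d', ?_, hnn, ?_⟩
    · simp only [pvPass, hget, if_neg hne]
      exact hd'
    · intro c
      rw [hv c, pvVal_insert]
      by_cases hceq : c = ch
      · subst hceq
        rw [if_pos rfl, List.count_cons_self]
        push_cast; ring
      · rw [if_neg hceq, List.count_cons_of_ne (Ne.symm hceq)]

lemma pass_fail (l : List Char) (d : PySem.Dict Char Int) (hd : pvNonneg d)
    (h : ∃ c ∈ l, pvVal d c < (l.count c : Int)) :
    pvPass d l = none := by
  induction l generalizing d with
  | nil => simp at h
  | cons ch rest ih =>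
    by_cases hz : pvVal d ch ≤ 0
    · have hz' : pvVal d ch = 0 := le_antisymm hz (pvVal_nonneg hd ch)
      cases hg : d.get? ch with
      | none => simp only [pvPass, hg]
      | some x =>
        have hx : x = 0 := by
          unfold pvVal at hz'
          rw [hg] at hz'
          simpa using hz'
        simp [pvPass, hg, hx]
    · rw [not_le] at hz
      have hget : d.get? ch = some (pvVal d ch) := by
        cases hg : d.get? ch with
        | none => exfalso; unfold pvVal at hz; rw [hg] at hz; norm_num at hz
        | some x => unfold pvVal; rw [hg]; rfl
      have hne : pvVal d ch ≠ 0 := by omega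
      simp only [pvPass, hget, if_neg hne]
      apply ih
      · exact pvNonneg_insert hd (by omega)
      · obtain ⟨c, hc, hlt⟩ := h
        rcases List.mem_cons.mp hc with rfl | hmem
        · rw [List.count_cons_self] at hlt
          have hrest : (0 : Int) < rest.count c := by push_cast at hlt ⊢; omega
          have hmemr : c ∈ rest := by
            rw [← List.count_pos_iff]
            exact_mod_cast hrest
          refine ⟨c, hmemr, ?_⟩
          rw [pvVal_insert, if_pos rfl]
          push_cast at hlt ⊢
          omega
        · refine ⟨c, hmem, ?_⟩
          rw [pvVal_insert]
          by_cases hceq : c = ch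
          · subst hceq
            rw [if_pos rfl, List.count_cons_self] at *
            push_cast at hlt ⊢
            omega
          · rw [if_neg hceq]
            rw [List.count_cons_of_ne (Ne.symm hceq)] at hlt
            exact hlt

lemma foldl_min_le_init (xs : List Int) (x : Int) : xs.foldl min x ≤ x := by
  induction xs generalizing x with
  | nil => simp
  | cons a t ih => exact le_trans (ih (min x a)) (by simp)

lemma foldl_min_le_mem (xs : List Int) (x y : Int) (hy : y ∈ xs) : xs.foldl min x ≤ y := by
  induction xs generalizing x with
  | nil => simp at hy
  | cons a t ih =>
    rcases List.mem_cons.mp hy with rfl | h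
    · exact le_trans (foldl_min_le_init t (min x y)) (by simp)
    · exact ih (min x a) h

lemma foldl_min_cases (xs : List Int) (x : Int) : xs.foldl min x = x ∨ xs.foldl min x ∈ xs := by
  induction xs generalizing x with
  | nil => simp
  | cons a t ih =>
    rcases ih (min x a) with h | h
    · rw [List.foldl_cons, h]
      rcases min_cases x a with ⟨he, _⟩ | ⟨he, _⟩
      · left; exact he
      · right; rw [he]; exact List.mem_cons_self
    · right; exact List.mem_cons_of_mem a (by rw [List.foldl_cons]; exact h)

lemma pvMinList_mem {l : List Int} (h : l ≠ []) : pvMinList l ∈ l := by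
  match l with
  | x :: xs =>
    rcases foldl_min_cases xs x with h' | h' <;> simp [pvMinList, h']

lemma pvMinList_le {l : List Int} {y : Int} (hy : y ∈ l) : pvMinList l ≤ y := by
  match l with
  | x :: xs =>
    rcases List.mem_cons.mp hy with rfl | h
    · exact foldl_min_le_init xs y
    · exact foldl_min_le_mem xs x y h

lemma pvMinList_eq_of {l : List Int} {m : Int} (hmem : m ∈ l) (hle : ∀ y ∈ l, m ≤ y) :
    pvMinList l = m := by
  have h1 : pvMinList l ≤ m := pvMinList_le hmem
  have h2 : m ≤ pvMinList l := hle _ (pvMinList_mem (by rintro rfl; simp at hmem))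
  omega

lemma loop_eq (t : List Char) (ht : t ≠ []) :
    ∀ (fuel : Nat) (d : PySem.Dict Char Int) (count : Int), pvNonneg d →
    pvMinList (t.map (fun c => PySem.Int.floordiv (pvVal d c) (t.count c))) < (fuel : Int) →
    pvLoop t fuel d count
      = count + pvMinList (t.map (fun c => PySem.Int.floordiv (pvVal d c) (t.count c))) := by
  intro fuel
  induction fuel with
  | zero =>
    intro d count hd hlt
    exfalso
    have hKmem := pvMinList_mem (l := t.map (fun c => PySem.Int.floordiv (pvVal d c) (t.count c)))
      (by simpa using ht)
    obtain ⟨c, hc, hce⟩ := List.mem_map.mp hKmem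
    have hcnt : 0 < (t.count c : Int) := by exact_mod_cast List.count_pos_iff.mpr hc
    rw [← hce, PySem.Int.floordiv_eq_ediv_of_pos hcnt] at hlt
    have := Int.ediv_nonneg (pvVal_nonneg hd c) (le_of_lt hcnt)
    omega
  | succ f ih =>
    intro d count hd hlt
    set K := pvMinList (t.map (fun c => PySem.Int.floordiv (pvVal d c) (t.count c))) with hK
    have hKmem : K ∈ t.map (fun c => PySem.Int.floordiv (pvVal d c) (t.count c)) :=
      pvMinList_mem (by simpa using ht)
    have hcntpos : ∀ c ∈ t, 0 < (t.count c : Int) := by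
      intro c hc
      exact_mod_cast List.count_pos_iff.mpr hc
    have hK0 : 0 ≤ K := by
      obtain ⟨c, hc, hce⟩ := List.mem_map.mp hKmem
      rw [← hce, PySem.Int.floordiv_eq_ediv_of_pos (hcntpos c hc)]
      exact Int.ediv_nonneg (pvVal_nonneg hd c) (le_of_lt (hcntpos c hc))
    by_cases hKz : K = 0
    · -- some character runs out: the pass fails
      obtain ⟨c, hc, hce⟩ := List.mem_map.mp hKmem
      have hlt' : pvVal d c < (t.count c : Int) := by
        rw [hKz] at hce
        by_contra hge
        rw [not_lt] at hge
        have h1 : (1 : Int) ≤ PySem.Int.floordiv (pvVal d c) (t.count c) := by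
          rw [PySem.Int.le_floordiv_iff_mul_le (hcntpos c hc)]
          simpa using hge
        omega
      have hfail := pass_fail t d hd ⟨c, hc, hlt'⟩
      simp [pvLoop, hfail, hKz]
    · -- every character suffices: the pass succeeds and K decreases by one
      have hall : ∀ c ∈ t, (t.count c : Int) ≤ pvVal d c := by
        intro c hc
        have hKle : K ≤ PySem.Int.floordiv (pvVal d c) (t.count c) :=
          pvMinList_le (List.mem_map.mpr ⟨c, hc, rfl⟩)
        have h1 : (1 : Int) ≤ PySem.Int.floordiv (pvVal d c) (t.count c) := by omega
        rw [PySem.Int.le_floordiv_iff_mul_le (hcntpos c hc)] at h1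
        omega
      obtain ⟨d', hpass, hnn', hv'⟩ := pass_succ t d hd hall
      have hquot : ∀ c ∈ t, PySem.Int.floordiv (pvVal d' c) (t.count c)
          = PySem.Int.floordiv (pvVal d c) (t.count c) - 1 := by
        intro c hc
        rw [hv' c]
        rw [PySem.Int.floordiv_eq_ediv_of_pos (hcntpos c hc),
            PySem.Int.floordiv_eq_ediv_of_pos (hcntpos c hc)]
        have : pvVal d c - (t.count c : Int) = pvVal d c + (-1) * (t.count c : Int) := by ring
        rw [this, Int.add_mul_ediv_right _ _ (by have := hcntpos c hc; omega)]
        ring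
      have hmap : t.map (fun c => PySem.Int.floordiv (pvVal d' c) (t.count c))
          = (t.map (fun c => PySem.Int.floordiv (pvVal d c) (t.count c))).map (fun x => x - 1) := by
        rw [List.map_map]
        exact List.map_congr_left (fun c hc => by simp [hquot c hc])
      have hKd' : pvMinList (t.map (fun c => PySem.Int.floordiv (pvVal d' c) (t.count c))) = K - 1 := by
        rw [hmap]
        apply pvMinList_eq_of
        · exact List.mem_map.mpr ⟨K, hKmem, rfl⟩
        · intro y hy
          obtain ⟨z, hz, rfl⟩ := List.mem_map.mp hy
          have := pvMinList_le hz
          omega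
      have := ih d' (count + 1) hnn' (by rw [hKd']; push_cast at hlt ⊢; omega)
      simp only [pvLoop, hpass, this, hKd']
      ring

lemma alt_eq (s target : String) (ht : target.toList ≠ []) :
    rearrangeCharacters_alt s target
      = pvMinList ((PySem.Set.ofList target.toList).map
          (fun c => PySem.Int.floordiv ((s.toList.count c : Int)) (target.toList.count c))) := by
  unfold rearrangeCharacters_alt pvFreq
  rw [PySem.Dict.foldl_insert_getD_add_one_eq_counter,
      PySem.Dict.foldl_insert_getD_add_one_eq_counter]
  dsimp only
  rw [PySem.Dict.items_counter]
  cases hdt : PySem.Set.ofList target.toList with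
  | nil =>
    exfalso
    obtain ⟨c, hc⟩ := List.exists_mem_of_ne_nil _ ht
    have : c ∈ PySem.Set.ofList target.toList := (PySem.Set.mem_ofList (xs := target.toList) (y := c)).mpr hc
    rw [hdt] at this
    simp at this
  | cons c0 drest =>
    simp only [List.map_cons, List.foldl_map, PySem.Dict.getD_counter, pvMinList]

lemma rearrangeCharacters_eq_alt : ∀ (s target : String), target ≠ "" →
    rearrangeCharacters s target = rearrangeCharacters_alt s target := by
  intro s target hpre
  have ht : target.toList ≠ [] := by
    intro h
    apply hpre
    have := congrArg String.ofList h
    simpa using this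
  set t := target.toList with htdef
  set d0 := pvBuildCounter s.toList (PySem.Set.ofList t) with hd0
  have hnn0 : pvNonneg d0 := by
    rw [hd0]
    unfold pvBuildCounter
    exact build_nonneg _ _ _ (by intro c x hx; simp [PySem.Dict.get?_empty] at hx)
  have hval0 : ∀ c ∈ t, pvVal d0 c = (s.toList.count c : Int) := by
    intro c hc
    rw [hd0]
    unfold pvBuildCounter
    rw [build_val]
    have hcont : PySem.Set.contains (PySem.Set.ofList t) c = true :=
      (PySem.Set.contains_iff _ _).mpr ((PySem.Set.mem_ofList (xs := t) (y := c)).mpr hc)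
    rw [if_pos hcont]
    simp [pvVal, PySem.Dict.get?_empty]
  have hmapeq : t.map (fun c => PySem.Int.floordiv (pvVal d0 c) (t.count c))
      = t.map (fun c => PySem.Int.floordiv ((s.toList.count c : Int)) (t.count c)) :=
    List.map_congr_left (fun c hc => by rw [hval0 c hc])
  have hbound : pvMinList (t.map (fun c => PySem.Int.floordiv (pvVal d0 c) (t.count c)))
      < ((s.toList.length + 1 : Nat) : Int) := by
    have hKmem := pvMinList_mem
      (l := t.map (fun c => PySem.Int.floordiv (pvVal d0 c) (t.count c))) (by simpa using ht)
    obtain ⟨c, hc, hce⟩ := List.mem_map.mp hKmem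
    have hcnt : 0 < (t.count c : Int) := by exact_mod_cast List.count_pos_iff.mpr hc
    have hle : PySem.Int.floordiv (pvVal d0 c) (t.count c) ≤ pvVal d0 c := by
      rw [PySem.Int.floordiv_eq_ediv_of_pos hcnt]
      exact Int.ediv_le_self _ (pvVal_nonneg hnn0 c)
    have hcountle : (s.toList.count c : Int) ≤ (s.toList.length : Int) := by
      exact_mod_cast List.count_le_length
    have hv := hval0 c hc
    push_cast
    omega
  unfold rearrangeCharacters
  rw [← htdef, loop_eq t ht _ d0 0 hnn0 hbound, hmapeq, alt_eq s target ht, ← htdef]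
  rw [zero_add]
  -- min over all of t equals min over the distinct characters of t
  apply pvMinList_eq_of
  · have hm := pvMinList_mem
      (l := (PySem.Set.ofList t).map (fun c => PySem.Int.floordiv ((s.toList.count c : Int)) (t.count c)))
      (by
        intro h
        obtain ⟨c, hc⟩ := List.exists_mem_of_ne_nil _ ht
        have : c ∈ PySem.Set.ofList t := (PySem.Set.mem_ofList (xs := t) (y := c)).mpr hc
        rw [List.map_eq_nil_iff.mp h] at this
        simp at this)
    obtain ⟨c, hc, hce⟩ := List.mem_map.mp hm
    rw [← hce]
    exact List.mem_map.mpr ⟨c, (PySem.Set.mem_ofList (xs := t) (y := c)).mp hc, rfl⟩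
  · intro y hy
    obtain ⟨c, hc, rfl⟩ := List.mem_map.mp hy
    exact pvMinList_le (List.mem_map.mpr ⟨c, (PySem.Set.mem_ofList (xs := t) (y := c)).mpr hc, rfl⟩)


-- ===== VERDICT (by name: the statement is the Claim_ definition above) =====
theorem rearrangeCharacters_spec : Claim_equal_rearrangeCharacters := by
  intro s target _hdom hpre
  unfold Spec_rearrangeCharacters
  exact rearrangeCharacters_eq_alt s target hpre
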